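-- pv_equiv track=rewrite | github.com/rstanleyc/progra-python | strings/clase2/ej3.py | codigo_palabra
-- ===== SOURCE A (Python) =====
-- def codigo_palabra(codigo):
--     i = 1
--     mensaje = ''
--     while i <= len(codigo):
--         if i % 2 != 0:
--             mensaje += codigo[-i]
--         i += 1
--     return mensaje
-- ===== SOURCE B (Python) =====
-- def codigo_palabra(codigo):
--     return codigo[::-1][::2]
-- ===== Notes on version B (the rewrite author's own statement) =====
-- stated objective: idiomatic
-- what changed: Replaced the 1-based while loop with a parity test, negative indexing and repeated string concatenation by a single double slice codigo[::-1][::2] (reverse, then every second character).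
import Mathlib
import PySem

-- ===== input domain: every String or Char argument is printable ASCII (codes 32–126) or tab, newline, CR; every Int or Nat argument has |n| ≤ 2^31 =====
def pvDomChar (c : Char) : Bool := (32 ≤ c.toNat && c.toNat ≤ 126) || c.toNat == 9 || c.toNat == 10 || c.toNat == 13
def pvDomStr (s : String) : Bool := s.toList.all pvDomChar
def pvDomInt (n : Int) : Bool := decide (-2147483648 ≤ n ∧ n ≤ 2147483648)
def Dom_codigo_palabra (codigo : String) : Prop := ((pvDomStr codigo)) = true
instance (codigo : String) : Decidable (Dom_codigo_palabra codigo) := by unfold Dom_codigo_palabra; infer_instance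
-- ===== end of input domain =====

-- B replaces A's while loop (parity test, negative index, repeated concatenation)
-- by the idiomatic double slice codigo[::-1][::2]; return value only, no mutation.

-- ===== PORT A =====
-- while i <= len(codigo): if i % 2 != 0: mensaje += codigo[-i]; i += 1
def codigo_palabra_loop (cs : List Char) (i : Nat) (acc : List Char) : List Char :=
  if _h : i ≤ cs.length then
    codigo_palabra_loop cs (i + 1)
      (if i % 2 ≠ 0 then
        match PySem.List.pyGet? cs (-(i : Int)) with
        | some c => acc ++ [c]
        | none => acc      -- unreachable: 1 ≤ i ≤ len, so codigo[-i] is in range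
      else acc)
  else acc
termination_by cs.length + 1 - i

def codigo_palabra (codigo : String) : String :=
  String.ofList (codigo_palabra_loop codigo.toList 1 [])

-- ===== PORT B =====
-- return codigo[::-1][::2]
def codigo_palabra_alt (codigo : String) : String :=
  match PySem.Str.slice? codigo none none (-1) with
  | some rev => (PySem.Str.slice? rev none none 2).getD ""   -- step 2 ≠ 0: never none
  | none => ""                                               -- unreachable: step -1 ≠ 0

-- ===== PRECONDITION & SPEC =====
def Spec_codigo_palabra (codigo : String) (out : String) : Prop := out = codigo_palabra_alt codigo
instance (codigo : String) (out : String) : Decidable (Spec_codigo_palabra codigo out) := by unfold Spec_codigo_palabra; infer_instance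

-- ===== CLAIM (what is proved, stated in full; the proofs are below) =====
def Claim_equal_codigo_palabra : Prop := ∀ (codigo : String), Dom_codigo_palabra codigo → Spec_codigo_palabra codigo (codigo_palabra codigo)

-- ===== LEMMAS AND PROOFS =====

-- every second element, starting at index 0 (what xs[::2] selects)
def everyOther {α : Type} : List α → List α
  | [] => []
  | [a] => [a]
  | a :: _ :: t => a :: everyOther t

theorem everyOther_cons {α : Type} (a : α) (t : List α) :
    everyOther (a :: t) = a :: everyOther (t.drop 1) := by
  cases t <;> simp [everyOther]

theorem filterMap_range_everyOther {α : Type} (xs : List α) :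
    List.filterMap (fun k => xs[2 * k]?) (List.range ((xs.length + 1) / 2)) = everyOther xs := by
  match xs with
  | [] => simp [everyOther]
  | [a] => simp [everyOther, List.range_succ]
  | a :: b :: t =>
    have ih := filterMap_range_everyOther t
    have hlen : ((a :: b :: t).length + 1) / 2 = (t.length + 1) / 2 + 1 := by
      simp only [List.length_cons]; omega
    rw [hlen, List.range_succ_eq_map, List.filterMap_cons, List.filterMap_map]
    simp only [Nat.mul_zero, List.getElem?_cons_zero, Function.comp]
    have harg : ∀ k : Nat, (a :: b :: t)[2 * Nat.succ k]? = t[2 * k]? := by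
      intro k
      have : 2 * Nat.succ k = (2 * k) + 1 + 1 := by omega
      rw [this]
      simp
    simp only [harg, ih, everyOther]

-- xs[::2] via PySem.List.slice?
theorem slice?_two {α : Type} (xs : List α) :
    PySem.List.slice? xs none none 2 = some (everyOther xs) := by
  simp only [PySem.List.slice?, PySem.List.sliceIndices]
  norm_num
  -- rewrite the index and the count, then apply the list lemma
  rw [show (fun x : Nat => xs[(2 * (x : Int)).toNat]?) = fun x : Nat => xs[2 * x]?
      from funext fun k => by rw [show ((2 : Int) * (k : Nat)).toNat = 2 * k from by omega]]
  rw [show (List.range (if 0 < xs.length then (((xs.length : Int) + 2 - 1) / 2).toNat else 0))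
        = List.range ((xs.length + 1) / 2) from by congr 1; split_ifs with h <;> omega]
  exact filterMap_range_everyOther xs

-- the loop of A computes acc ++ everyOther of the (partially consumed) reversed string
theorem codigo_palabra_loop_eq (cs : List Char) (i : Nat) (acc : List Char) (hi : 1 ≤ i) :
    codigo_palabra_loop cs i acc =
      acc ++ (if i % 2 = 1 then everyOther (cs.reverse.drop (i - 1))
              else everyOther (cs.reverse.drop i)) := by
  rw [codigo_palabra_loop]
  by_cases h : i ≤ cs.length
  · simp only [h, dif_pos]
    have ih := codigo_palabra_loop_eq cs (i + 1) -- instantiated per branch below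
    by_cases hpar : i % 2 = 1
    · -- odd step: append cs[-i] = cs.reverse[i-1]
      have hget : PySem.List.pyGet? cs (-(i : Int)) = cs[cs.length - i]? :=
        PySem.List.pyGet?_neg_natCast cs i (by omega) h
      have hidx : cs.length - i < cs.length := by omega
      have h1 : i - 1 < cs.reverse.length := by rw [List.length_reverse]; omega
      have hget' : PySem.List.pyGet? cs (-(i : Int)) = some cs[cs.length - i] := by
        rw [hget, List.getElem?_eq_getElem hidx]
      rw [if_pos (by omega)]
      rw [hget']
      rw [ih (acc ++ [cs[cs.length - i]]) (by omega)]
      rw [if_neg (by omega)]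
      rw [if_pos hpar]
      have hdrop : cs.reverse.drop (i - 1) = cs[cs.length - i] :: cs.reverse.drop i := by
        rw [List.drop_eq_getElem_cons h1, List.getElem_reverse h1]
        simp only [show cs.length - 1 - (i - 1) = cs.length - i from by omega,
          show i - 1 + 1 = i from by omega]
      rw [hdrop, everyOther_cons, List.drop_drop]
      simp
    · -- even step: skip
      rw [if_neg (by omega), ih acc (by omega), if_pos (by omega), if_neg hpar]
      norm_num
  · -- loop finished: i > len, both drops are past the end
    rw [dif_neg h]
    have h1 : cs.reverse.drop (i - 1) = [] := List.drop_eq_nil_of_le (by simp; omega)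
    have h2 : cs.reverse.drop i = [] := List.drop_eq_nil_of_le (by simp; omega)
    rw [h1, h2]
    simp [everyOther]
termination_by cs.length + 1 - i
decreasing_by omega

theorem codigo_palabra_alt_eq (codigo : String) :
    codigo_palabra_alt codigo = String.ofList (everyOther codigo.toList.reverse) := by
  unfold codigo_palabra_alt
  rw [PySem.Str.slice?_none_none_neg_one]
  simp only [PySem.Str.slice?, PySem.Chars.slice?_eq_listSlice?]
  rw [show (String.ofList codigo.toList.reverse).toList = codigo.toList.reverse from by simp]
  rw [slice?_two]
  rfl

-- ===== VERDICT (by name: the statement is the Claim_ definition above) =====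
theorem codigo_palabra_spec : Claim_equal_codigo_palabra := by
  intro codigo _
  unfold Spec_codigo_palabra codigo_palabra
  rw [codigo_palabra_loop_eq codigo.toList 1 [] (by omega)]
  rw [codigo_palabra_alt_eq]
  simp
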